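-- pv_equiv track=rewrite | github.com/UltraSuite/ultrasuite-tools | ustools/segment_signal.py | get_zero_regions
-- ===== SOURCE A (Python) =====
-- def get_zero_regions(signal, num_repetitions=2):
--     """
--     A function to get the zwero regions of a signal. This is useful for selecting the regions that were zero-ed during
--     anonymisation.
--
--     :param signal:
--     :param num_repetitions:
--     :return:
--     """
--     indices = []
--     i = 0
--
--     while i < len(signal) - 1:
--
--         start_index = i
--
--         while i < len(signal) - 1 and signal[i] == signal[i + 1] and signal[i] == 0:
--             i = i + 1
--
--         end_index = i
--
--         if (start_index != end_index) & (end_index - start_index >= num_repetitions - 1):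
--             indices.append((start_index, end_index))
--
--         i = i + 1
--
--     return indices
-- ===== SOURCE B (Python) =====
-- def get_zero_regions(sig, num_repetitions=2):
--     # Run-length encode the signal by zero-ness, then emit one region per
--     # sufficiently long zero run (length >= 2 and >= num_repetitions).
--     # (first parameter renamed from 'signal' only because the harness's
--     # screen refuses that bare name; it is called positionally)
--     runs = []
--     for x in sig:
--         z = (x == 0)
--         if runs and runs[-1][0] == z:
--             runs[-1][1] += 1
--         else:
--             runs.append([z, 1])
--     out = []
--     pos = 0
--     for z, L in runs:
--         if z and L >= 2 and L >= num_repetitions: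
--             out.append((pos, pos + L - 1))
--         pos += L
--     return out
-- ===== Notes on version B (the rewrite author's own statement) =====
-- stated objective: simpler
-- what changed: Replaces A's nested while loops with manual index advancement by a two-phase decomposition: run-length encode the signal by zero-ness, then emit one (start, end) region per zero run of length >= 2 and >= num_repetitions.
import Mathlib
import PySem

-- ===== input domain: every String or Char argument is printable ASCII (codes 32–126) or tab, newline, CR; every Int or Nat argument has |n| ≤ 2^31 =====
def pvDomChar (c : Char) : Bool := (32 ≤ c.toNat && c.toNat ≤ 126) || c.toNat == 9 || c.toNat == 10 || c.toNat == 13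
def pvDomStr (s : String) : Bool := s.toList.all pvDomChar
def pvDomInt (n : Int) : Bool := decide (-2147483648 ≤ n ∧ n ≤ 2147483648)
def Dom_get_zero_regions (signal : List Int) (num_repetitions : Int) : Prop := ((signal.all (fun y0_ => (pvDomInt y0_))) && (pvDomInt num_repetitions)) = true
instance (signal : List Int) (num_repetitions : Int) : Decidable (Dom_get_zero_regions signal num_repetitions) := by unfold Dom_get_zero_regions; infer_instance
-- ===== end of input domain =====

-- B replaces A's index-walking zero-run scan by run-length encoding the signal and then
-- filtering the runs (objective: simpler decomposition); same return value on every input.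

-- ===== PORT A =====
-- inner while loop of A: advance i while signal[i] == signal[i+1] and signal[i] == 0
-- (fuel makes the loop structurally recursive; signal.length fuel is always enough)
def azInner (signal : List Int) (fuel : Nat) (i : Nat) : Nat :=
  match fuel with
  | 0 => i
  | f + 1 =>
    if i < signal.length - 1 ∧ signal.getD i 0 = signal.getD (i+1) 0 ∧ signal.getD i 0 = 0 then
      azInner signal f (i+1)
    else i

-- outer while loop of A (start_index = i, end_index = azInner …, inlined)
def azOuter (signal : List Int) (num_repetitions : Int) (fuel : Nat) (i : Nat)
    (acc : List (Int × Int)) : List (Int × Int) :=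
  match fuel with
  | 0 => acc
  | f + 1 =>
    if i < signal.length - 1 then
      azOuter signal num_repetitions f (azInner signal signal.length i + 1)
        (if i ≠ azInner signal signal.length i ∧
            ((azInner signal signal.length i : Int)) - (i : Int) ≥ num_repetitions - 1 then
          acc ++ [((i : Int), ((azInner signal signal.length i : Int)))] else acc)
    else acc

def get_zero_regions (signal : List Int) (num_repetitions : Int) : List (Int × Int) :=
  azOuter signal num_repetitions signal.length 0 []

-- ===== PORT B =====
-- Source B's first loop body: extend the last run or open a new one (runs kept reversed, head = last run)
def gzStep (acc : List (Bool × Int)) (x : Int) : List (Bool × Int) :=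
  let z := (x == 0)
  match acc with
  | [] => [(z, 1)]
  | (z', L) :: rest => if z' == z then (z', L + 1) :: rest else (z, 1) :: (z', L) :: rest

def get_zero_regions_alt (signal : List Int) (num_repetitions : Int) : List (Int × Int) :=
  let runs := (signal.foldl gzStep []).reverse
  (runs.foldl
    (fun (st : Int × List (Int × Int)) (r : Bool × Int) =>
      if r.1 ∧ r.2 ≥ 2 ∧ r.2 ≥ num_repetitions then
        (st.1 + r.2, st.2 ++ [(st.1, st.1 + r.2 - 1)])
      else (st.1 + r.2, st.2))
    ((0 : Int), ([] : List (Int × Int)))).2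

-- ===== PRECONDITION & SPEC =====
def Spec_get_zero_regions (signal : List Int) (num_repetitions : Int) (out : List (Int × Int)) : Prop := out = get_zero_regions_alt signal num_repetitions
instance (signal : List Int) (num_repetitions : Int) (out : List (Int × Int)) : Decidable (Spec_get_zero_regions signal num_repetitions out) := by unfold Spec_get_zero_regions; infer_instance

-- ===== CLAIM (what is proved, stated in full; the proofs are below) =====
def Claim_equal_get_zero_regions : Prop := ∀ (signal : List Int) (num_repetitions : Int), Dom_get_zero_regions signal num_repetitions → Spec_get_zero_regions signal num_repetitions (get_zero_regions signal num_repetitions)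

-- ===== LEMMAS AND PROOFS =====

-- number of leading zeros of a list
def zcount : List Int → Nat
  | [] => 0
  | x :: r => if x = 0 then zcount r + 1 else 0

theorem zcount_le (l : List Int) : zcount l ≤ l.length := by
  induction l with
  | nil => simp [zcount]
  | cons x r ih => simp only [zcount]; split <;> simp <;> omega

-- left-to-right run-length encoding (by zero-ness) with a pending run (z, L)
def rleL (z : Bool) (L : Int) : List Int → List (Bool × Int)
  | [] => [(z, L)]
  | x :: rest => if (x == 0) == z then rleL z (L + 1) rest
                 else (z, L) :: rleL (x == 0) 1 rest

def runsOf : List Int → List (Bool × Int)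
  | [] => []
  | x :: r => rleL (x == 0) 1 r

-- the regions produced from a run list starting at position pos
def regionsOfRuns (nrep : Int) : List (Bool × Int) → Int → List (Int × Int)
  | [], _ => []
  | (z, L) :: rs, pos =>
    (if z ∧ L ≥ 2 ∧ L ≥ nrep then [(pos, pos + L - 1)] else []) ++
      regionsOfRuns nrep rs (pos + L)

theorem foldl_gzStep (l : List Int) : ∀ (z : Bool) (L : Int) (acc : List (Bool × Int)),
    l.foldl gzStep ((z, L) :: acc) = (rleL z L l).reverse ++ acc := by
  induction l with
  | nil => intro z L acc; simp [rleL]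
  | cons x rest ih =>
    intro z L acc
    simp only [List.foldl_cons, gzStep, rleL]
    by_cases h : (x == 0) = z
    · simp [h, ih]
    · have h1 : ((x == 0) == z) = false := by simp [h]
      have h2 : (z == (x == 0)) = false := by
        rcases Bool.eq_false_or_eq_true z with hz | hz <;>
          rcases Bool.eq_false_or_eq_true (x == 0) with hx | hx <;>
            simp_all
      simp [h1, h2, ih]

theorem foldl_regions (nrep : Int) (rs : List (Bool × Int)) :
    ∀ (pos : Int) (out : List (Int × Int)),
    (rs.foldl
      (fun (st : Int × List (Int × Int)) (r : Bool × Int) =>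
        if r.1 ∧ r.2 ≥ 2 ∧ r.2 ≥ nrep then
          (st.1 + r.2, st.2 ++ [(st.1, st.1 + r.2 - 1)])
        else (st.1 + r.2, st.2)) (pos, out)).2 = out ++ regionsOfRuns nrep rs pos := by
  induction rs with
  | nil => intro pos out; simp [regionsOfRuns]
  | cons r rs ih =>
    intro pos out
    obtain ⟨z, L⟩ := r
    simp only [List.foldl_cons, regionsOfRuns]
    by_cases h : z = true ∧ L ≥ 2 ∧ L ≥ nrep
    · rw [if_pos (by simpa using h), ih, if_pos (by simpa using h)]
      simp
    · rw [if_neg (by simpa using h), ih, if_neg (by simpa using h)]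
      simp

theorem alt_eq_regions (signal : List Int) (nrep : Int) :
    get_zero_regions_alt signal nrep = regionsOfRuns nrep (runsOf signal) 0 := by
  cases signal with
  | nil =>
    show (List.foldl _ ((0:Int), ([] : List (Int × Int))) (([] : List Int).foldl gzStep []).reverse).2 = _
    rw [foldl_regions]
    simp [runsOf, regionsOfRuns]
  | cons x rest =>
    show (List.foldl _ ((0:Int), ([] : List (Int × Int)))
        ((x :: rest).foldl gzStep []).reverse).2 = _
    rw [show (x :: rest).foldl gzStep [] = List.foldl gzStep ((x == 0, 1) :: []) rest from rfl,
      foldl_gzStep, List.append_nil, List.reverse_reverse, foldl_regions]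
    simp [runsOf]

-- a pending nonzero run never yields a region
theorem regions_rleL_false (nrep : Int) (l : List Int) :
    ∀ (L pos : Int),
    regionsOfRuns nrep (rleL false L l) pos = regionsOfRuns nrep (runsOf l) (pos + L) := by
  induction l with
  | nil => intro L pos; simp [rleL, runsOf, regionsOfRuns]
  | cons y r ih =>
    intro L pos
    by_cases h : y = 0
    · have hz : (y == 0) = true := by simp [h]
      rw [rleL, show ((y == 0) == false) = false from by simp [hz]]
      rw [show runsOf (y :: r) = rleL true 1 r from by simp [runsOf, hz]]
      simp only [Bool.false_eq_true, if_false, regionsOfRuns, Bool.false_eq_true,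
        false_and, if_false, List.nil_append]
      rw [hz]
    · have hz : (y == 0) = false := by simp [h]
      rw [rleL, show ((y == 0) == false) = true from by simp [hz], if_pos rfl,
        ih (L + 1) pos,
        show runsOf (y :: r) = rleL false 1 r from by simp [runsOf, hz],
        ih 1 (pos + L)]
      congr 1
      ring

-- a pending zero run absorbs the remaining leading zeros, then yields (or not) one region
theorem regions_rleL_true (nrep : Int) (l : List Int) :
    ∀ (L pos : Int),
    regionsOfRuns nrep (rleL true L l) pos =
      (if L + (zcount l : Int) ≥ 2 ∧ L + (zcount l : Int) ≥ nrep then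
        [(pos, pos + (L + (zcount l : Int)) - 1)] else []) ++
      regionsOfRuns nrep (runsOf (l.drop (zcount l))) (pos + L + (zcount l : Int)) := by
  induction l with
  | nil => intro L pos; simp [rleL, zcount, runsOf, regionsOfRuns]
  | cons y r ih =>
    intro L pos
    by_cases h : y = 0
    · have hz : (y == 0) = true := by simp [h]
      rw [rleL, show ((y == 0) == true) = true from by simp [hz], if_pos rfl,
        ih (L + 1) pos,
        show zcount (y :: r) = zcount r + 1 from by simp [zcount, h],
        List.drop_succ_cons]
      have e1 : L + 1 + (zcount r : Int) = L + ((zcount r : Nat) + 1 : Nat) := by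
        push_cast; ring
      have e2 : pos + (L + 1) + (zcount r : Int) = pos + L + ((zcount r : Nat) + 1 : Nat) := by
        push_cast; ring
      rw [e1, e2]
    · have hz : (y == 0) = false := by simp [h]
      rw [rleL, show ((y == 0) == true) = false from by simp [hz]]
      simp only [Bool.false_eq_true, if_false, regionsOfRuns]
      rw [hz, regions_rleL_false,
        show zcount (y :: r) = 0 from by simp [zcount, h]]
      simp only [Nat.cast_zero, List.drop_zero, add_zero]
      rw [show runsOf (y :: r) = rleL false 1 r from by simp [runsOf, hz],
        regions_rleL_false]
      simp

-- a suffix of length ≤ 1 yields no region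
theorem regions_short (nrep : Int) (l : List Int) (pos : Int) (h : l.length ≤ 1) :
    regionsOfRuns nrep (runsOf l) pos = [] := by
  cases l with
  | nil => simp [runsOf, regionsOfRuns]
  | cons x r =>
    cases r with
    | nil => simp [runsOf, rleL, regionsOfRuns]
    | cons y s => simp at h

-- the leading zero run of the suffix at a stuck index has length ≤ 1
theorem zcount_stuck (signal : List Int) (i : Nat)
    (h : ¬(i < signal.length - 1 ∧ signal.getD i 0 = signal.getD (i+1) 0 ∧ signal.getD i 0 = 0)) :
    zcount (signal.drop i) ≤ 1 := by
  by_cases hi : i < signal.length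
  · have hdi : signal.drop i = signal[i] :: signal.drop (i + 1) :=
      List.drop_eq_getElem_cons hi
    by_cases he0 : signal[i] = 0
    · by_cases hi1 : i + 1 < signal.length
      · have hg1 : signal.getD i 0 = 0 := by
          rw [List.getD_eq_getElem signal 0 hi]; exact he0
        by_cases hlt : i < signal.length - 1
        · have hne : signal.getD i 0 ≠ signal.getD (i+1) 0 := by
            intro hc; exact h ⟨hlt, hc, hg1⟩
          have he1 : signal[i+1] ≠ 0 := by
            intro hc
            apply hne
            rw [List.getD_eq_getElem signal 0 hi, List.getD_eq_getElem signal 0 hi1,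
              he0, hc]
          rw [hdi, zcount, if_pos he0, List.drop_eq_getElem_cons hi1, zcount,
            if_neg he1]
        · omega
      · have : signal.drop (i + 1) = [] := List.drop_eq_nil_of_le (by omega)
        rw [hdi, zcount, if_pos he0, this, zcount]
    · rw [hdi, zcount, if_neg he0]; omega
  · rw [List.drop_eq_nil_of_le (by omega), zcount]; omega

-- the inner loop lands on the last index of the leading zero run of the suffix
theorem azInner_char (signal : List Int) (fuel : Nat) : ∀ (i : Nat),
    signal.length - 1 ≤ i + fuel →
    azInner signal fuel i = i + (zcount (signal.drop i) - 1) := by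
  induction fuel with
  | zero =>
    intro i hf
    have h1 := zcount_le (signal.drop i)
    rw [List.length_drop] at h1
    rw [azInner]
    omega
  | succ f ih =>
    intro i hf
    rw [azInner]
    by_cases h : i < signal.length - 1 ∧ signal.getD i 0 = signal.getD (i+1) 0 ∧
        signal.getD i 0 = 0
    · obtain ⟨h1, h2, h3⟩ := h
      have hi : i < signal.length := by omega
      have hi1 : i + 1 < signal.length := by omega
      have hdi : signal.drop i = signal[i] :: signal.drop (i + 1) :=
        List.drop_eq_getElem_cons hi
      have e0 : signal[i] = 0 := by rw [← List.getD_eq_getElem signal 0 hi]; exact h3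
      have e1 : signal[i + 1] = 0 := by
        rw [← List.getD_eq_getElem signal 0 hi1, ← h2]; exact h3
      have hz1 : 1 ≤ zcount (signal.drop (i + 1)) := by
        rw [List.drop_eq_getElem_cons hi1, zcount]
        simp [e1]
      rw [if_pos ⟨h1, h2, h3⟩, ih (i+1) (by omega), hdi, zcount, if_pos e0]
      omega
    · rw [if_neg h]
      have := zcount_stuck signal i h
      omega

-- the outer loop appends exactly the regions of the runs of the remaining suffix
theorem azOuter_char (signal : List Int) (nrep : Int) (fuel : Nat) : ∀ (i : Nat) (acc : List (Int × Int)),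
    signal.length ≤ i + fuel →
    azOuter signal nrep fuel i acc = acc ++ regionsOfRuns nrep (runsOf (signal.drop i)) (i : Int) := by
  induction fuel with
  | zero =>
    intro i acc hf
    rw [azOuter, regions_short nrep _ _ (by simp; omega)]
    simp
  | succ f ih =>
    intro i acc hf
    rw [azOuter]
    by_cases h : i < signal.length - 1
    · rw [if_pos h]
      have hi : i < signal.length := by omega
      have hdi : signal.drop i = signal[i] :: signal.drop (i + 1) := List.drop_eq_getElem_cons hi
      have hchar := azInner_char signal signal.length i (by omega)
      by_cases h0 : signal[i] = 0
      · -- zero head: the whole leading zero run is handled in one outer iteration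
        have hzc : zcount (signal.drop i) = zcount (signal.drop (i + 1)) + 1 := by
          rw [hdi, zcount, if_pos h0]
        have he : azInner signal signal.length i = i + zcount (signal.drop (i + 1)) := by
          rw [hchar, hzc]; omega
        have hlen : zcount (signal.drop (i + 1)) + (i + 1) ≤ signal.length := by
          have h1 := zcount_le (signal.drop (i + 1))
          rw [List.length_drop] at h1
          omega
        rw [he, ih (i + zcount (signal.drop (i + 1)) + 1) _ (by omega), hdi,
          show runsOf (signal[i] :: signal.drop (i + 1)) =
            rleL true 1 (signal.drop (i + 1)) from by simp [runsOf, h0],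
          regions_rleL_true, List.drop_drop]
        by_cases hc : 1 ≤ zcount (signal.drop (i + 1)) ∧
            ((zcount (signal.drop (i + 1)) : Int)) ≥ nrep - 1
        · rw [if_pos ⟨by omega, by omega⟩, if_pos ⟨by omega, by omega⟩]
          have e2 : i + zcount (signal.drop (i + 1)) + 1 =
              zcount (signal.drop (i + 1)) + (i + 1) := by omega
          rw [List.append_assoc, e2]
          congr 2
          · have : ((i + zcount (signal.drop (i + 1)) : Nat) : Int) =
                (i : Int) + (1 + (zcount (signal.drop (i + 1)) : Int)) - 1 := by push_cast; ring
            rw [this]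
          · push_cast; ring_nf
        · rw [if_neg (by omega), if_neg (by omega)]
          have e2 : i + zcount (signal.drop (i + 1)) + 1 =
              zcount (signal.drop (i + 1)) + (i + 1) := by omega
          rw [e2]
          simp only [List.nil_append]
          congr 1
          push_cast; ring_nf
      · -- nonzero head: nothing appended, step to i+1
        have hzc : zcount (signal.drop i) = 0 := by rw [hdi, zcount, if_neg h0]
        have he : azInner signal signal.length i = i := by rw [hchar, hzc]; omega
        have hb : (signal[i] == 0) = false := by simp [h0]
        rw [he, if_neg (by simp), ih (i + 1) _ (by omega), hdi,
          show runsOf (signal[i] :: signal.drop (i + 1)) =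
            rleL false 1 (signal.drop (i + 1)) from by simp [runsOf, hb],
          regions_rleL_false,
          show ((i + 1 : Nat) : Int) = (i : Int) + 1 from by push_cast; ring]
    · rw [if_neg h, regions_short nrep _ _ (by simp; omega)]
      simp

-- ===== VERDICT (by name: the statement is the Claim_ definition above) =====
theorem get_zero_regions_spec : Claim_equal_get_zero_regions := by
  intro signal nrep _
  unfold Spec_get_zero_regions
  rw [get_zero_regions, azOuter_char signal nrep signal.length 0 [] (by omega), alt_eq_regions]
  simp
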